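-- pv_equiv track=rewrite | github.com/SIIS-Sentinel/scheduler | src/trace_maker.py | get_next_ts
-- ===== SOURCE A (Python) =====
-- from typing import List, Dict, Tuple, Optional
--
-- def get_next_ts(ts: int, points: Dict[int, int]) -> Tuple[int, int]:
--     best_ts: Optional[int] = None
--     best_val: Optional[int] = None
--     for point in points:
--         if (best_ts is None or point < best_ts) and point > ts:
--             # raise Exception(f"{point} and {best_ts} and {ts}")
--             best_ts = point
--             best_val = points[point]
--     if best_ts is None or best_val is None:
--         raise KeyError(f"Next value of {ts} not found.")
--     else:
--         return (best_ts, best_val)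
-- ===== SOURCE B (Python) =====
-- import bisect
--
--
-- def get_next_ts(ts, points):
--     keys = sorted(points)
--     i = bisect.bisect_right(keys, ts)
--     if i == len(keys):
--         raise KeyError(f"Next value of {ts} not found.")
--     k = keys[i]
--     return (k, points[k])
-- ===== Notes on version B (the rewrite author's own statement) =====
-- stated objective: alternative
-- what changed: Replaces A's single-pass running-minimum scan over the keys with sort-then-binary-search: sort the keys once and locate the first key strictly greater than ts with bisect.bisect_right.
import Mathlib
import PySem

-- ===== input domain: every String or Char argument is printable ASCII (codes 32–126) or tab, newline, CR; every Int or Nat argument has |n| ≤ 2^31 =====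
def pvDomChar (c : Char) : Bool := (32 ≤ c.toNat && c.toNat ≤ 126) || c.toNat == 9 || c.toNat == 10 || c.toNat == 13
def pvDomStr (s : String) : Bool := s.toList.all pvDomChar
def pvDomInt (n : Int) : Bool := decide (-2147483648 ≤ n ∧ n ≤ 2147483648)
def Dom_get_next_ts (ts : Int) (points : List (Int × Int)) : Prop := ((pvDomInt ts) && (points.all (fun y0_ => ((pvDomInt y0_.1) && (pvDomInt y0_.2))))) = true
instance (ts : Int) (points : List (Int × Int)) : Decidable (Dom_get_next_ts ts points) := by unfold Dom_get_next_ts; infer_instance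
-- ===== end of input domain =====

-- B replaces A's running-minimum scan by sort-then-binary-search (same result, not faster: one query).

-- ===== PORT A =====
def get_next_ts (ts : Int) (points : List (Int × Int)) : Int × Int :=
  -- literal port: best_ts/best_val accumulator over the dict's keys in insertion order;
  -- points[point] is the dict lookup; the final KeyError case is excluded by Pre_ (returns (0, 0) there).
  let d : PySem.Dict Int Int := PySem.Dict.mk points
  let st := points.foldl
    (fun (b : Option Int × Option Int) (p : Int × Int) =>
      if (b.1.isNone || decide (p.1 < b.1.getD 0)) && decide (ts < p.1)
      then (some p.1, d.get? p.1) else b)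
    (none, none)
  match st with
  | (some bt, some bv) => (bt, bv)
  | _ => (0, 0)

-- ===== PORT B =====
def get_next_ts_alt (ts : Int) (points : List (Int × Int)) : Int × Int :=
  -- literal port of Source B: sorted(points) sorts the keys; bisect.bisect_right is PySem.List.bisectRight;
  -- the KeyError case (i == len(keys)) is excluded by Pre_ (returns (0, 0) there);
  -- keys[i] and points[k] always succeed when i < len(keys), so getD is exact there.
  let keys := PySem.List.sorted (points.map Prod.fst) (fun k => k) false
  let i := PySem.List.bisectRight keys ts
  if i = keys.length then (0, 0)
  else
    let k := keys.getD i 0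
    (k, (PySem.Dict.mk points).getD k 0)

-- ===== PRECONDITION & SPEC =====
-- Pre_ excludes (a) inputs with no key greater than ts, where A raises KeyError, and (b) association
-- lists with duplicate keys, which do not represent any Python dict (A's parameter is a dict).
def Pre_get_next_ts (ts : Int) (points : List (Int × Int)) : Prop :=
  (points.map Prod.fst).Nodup ∧ ∃ p ∈ points, ts < p.1
instance (ts : Int) (points : List (Int × Int)) : Decidable (Pre_get_next_ts ts points) := by
  unfold Pre_get_next_ts; infer_instance
def pvWitness_get_next_ts : Int × (List (Int × Int)) := (3, [(7, 10), (2, 20), (5, 30)])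

def Spec_get_next_ts (ts : Int) (points : List (Int × Int)) (out : Int × Int) : Prop := out = get_next_ts_alt ts points
instance (ts : Int) (points : List (Int × Int)) (out : Int × Int) : Decidable (Spec_get_next_ts ts points out) := by unfold Spec_get_next_ts; infer_instance

-- ===== CLAIM (what is proved, stated in full; the proofs are below) =====
def Claim_equal_get_next_ts : Prop := ∀ (ts : Int) (points : List (Int × Int)), Dom_get_next_ts ts points → Pre_get_next_ts ts points → Spec_get_next_ts ts points (get_next_ts ts points)

-- ===== LEMMAS AND PROOFS =====

/-- The loop body of A's port, named for the proofs (definitionally the lambda in `get_next_ts`). -/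
def stepA (ts : Int) (d : PySem.Dict Int Int) (b : Option Int × Option Int) (p : Int × Int) :
    Option Int × Option Int :=
  if (b.1.isNone || decide (p.1 < b.1.getD 0)) && decide (ts < p.1)
  then (some p.1, d.get? p.1) else b

lemma get_next_ts_eq (ts : Int) (points : List (Int × Int)) :
    get_next_ts ts points =
      match points.foldl (stepA ts (PySem.Dict.mk points)) (none, none) with
      | (some bt, some bv) => (bt, bv)
      | _ => (0, 0) := rfl

/-- The Boolean guard of A's loop, as a proposition. -/
lemma stepA_eq (ts : Int) (d : PySem.Dict Int Int) (b : Option Int × Option Int) (p : Int × Int) :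
    stepA ts d b p =
      if (b.1 = none ∨ p.1 < b.1.getD 0) ∧ ts < p.1 then (some p.1, d.get? p.1) else b := by
  simp only [stepA, Bool.and_eq_true, Bool.or_eq_true, decide_eq_true_eq,
    Option.isNone_iff_eq_none]

/-- Invariant of A's fold: if the accumulator ends at `some v`, then `v` is a key of the traversed
list (or the incoming best), `v > ts`, the value slot is the dict lookup at `v`, and `v` is minimal
among all candidates seen. If it ends at `none`, nothing qualified. -/
lemma foldA_spec (ts : Int) (d : PySem.Dict Int Int) :
    ∀ (l : List (Int × Int)) (b : Option Int × Option Int),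
      (∀ v, b.1 = some v → ts < v ∧ b.2 = d.get? v) →
      (∀ v, (l.foldl (stepA ts d) b).1 = some v →
        ts < v ∧ (l.foldl (stepA ts d) b).2 = d.get? v ∧
        (b.1 = some v ∨ ∃ p ∈ l, p.1 = v) ∧
        (∀ p ∈ l, ts < p.1 → v ≤ p.1) ∧ (∀ w, b.1 = some w → v ≤ w))
      ∧ ((l.foldl (stepA ts d) b).1 = none → b.1 = none ∧ ∀ p ∈ l, ¬ ts < p.1) := by
  intro l
  induction l with
  | nil =>
    intro b hb
    refine ⟨fun v hv => ?_, fun hn => ⟨hn, by simp⟩⟩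
    simp only [List.foldl_nil] at hv
    obtain ⟨h1, h2⟩ := hb v hv
    refine ⟨h1, h2, Or.inl hv, by simp, fun w hw => ?_⟩
    rw [hv] at hw
    simp at hw
    omega
  | cons p l ih =>
    intro b hb
    by_cases hc : (b.1 = none ∨ p.1 < b.1.getD 0) ∧ ts < p.1
    · -- the guard fires: accumulator becomes (some p.1, d.get? p.1)
      have hstep : stepA ts d b p = (some p.1, d.get? p.1) := by rw [stepA_eq, if_pos hc]
      have hb' : ∀ v, ((some p.1 : Option Int), d.get? p.1).1 = some v →
          ts < v ∧ ((some p.1 : Option Int), d.get? p.1).2 = d.get? v := by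
        intro v hv
        simp only [Option.some.injEq] at hv
        subst hv
        exact ⟨hc.2, rfl⟩
      obtain ⟨ihs, ihn⟩ := ih (some p.1, d.get? p.1) hb'
      refine ⟨fun v hv => ?_, fun hn => ?_⟩
      · simp only [List.foldl_cons, hstep] at hv ⊢
        obtain ⟨h1, h2, h3, h4, h5⟩ := ihs v hv
        refine ⟨h1, h2, ?_, ?_, ?_⟩
        · rcases h3 with h3 | ⟨q, hq, hqv⟩
          · simp only [Option.some.injEq] at h3
            exact Or.inr ⟨p, List.mem_cons_self .., h3⟩
          · exact Or.inr ⟨q, List.mem_cons_of_mem _ hq, hqv⟩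
        · intro q hq hq2
          rcases List.mem_cons.mp hq with h | h
          · rw [h]; exact h5 p.1 rfl
          · exact h4 q h hq2
        · intro w hw
          have hle : v ≤ p.1 := h5 p.1 rfl
          have hpw : p.1 < w := by
            rcases hc.1 with h | h
            · rw [hw] at h; cases h
            · rw [hw] at h; simpa using h
          omega
      · simp only [List.foldl_cons, hstep] at hn
        obtain ⟨hn1, _⟩ := ihn hn
        cases hn1
    · -- the guard does not fire: accumulator unchanged
      have hstep : stepA ts d b p = b := by rw [stepA_eq, if_neg hc]
      obtain ⟨ihs, ihn⟩ := ih b hb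
      refine ⟨fun v hv => ?_, fun hn => ?_⟩
      · simp only [List.foldl_cons, hstep] at hv ⊢
        obtain ⟨h1, h2, h3, h4, h5⟩ := ihs v hv
        refine ⟨h1, h2, ?_, ?_, h5⟩
        · rcases h3 with h3 | ⟨q, hq, hqv⟩
          · exact Or.inl h3
          · exact Or.inr ⟨q, List.mem_cons_of_mem _ hq, hqv⟩
        · intro q hq hq2
          rcases List.mem_cons.mp hq with h | h
          · -- q = p: the guard was false although ts < p.1, so b.1 = some w with w ≤ p.1
            rcases hb1 : b.1 with _ | w
            · exact absurd ⟨Or.inl hb1, h ▸ hq2⟩ hc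
            · have hwle : w ≤ p.1 := by
                by_contra hlt
                exact hc ⟨Or.inr (by rw [hb1]; simpa using not_le.mp hlt), h ▸ hq2⟩
              have := h5 w hb1
              rw [h]; omega
          · exact h4 q h hq2
      · simp only [List.foldl_cons, hstep] at hn
        obtain ⟨hn1, hn2⟩ := ihn hn
        refine ⟨hn1, fun q hq => ?_⟩
        rcases List.mem_cons.mp hq with h | h
        · intro hq2; exact hc ⟨Or.inl hn1, h ▸ hq2⟩
        · exact hn2 q h

-- ===== VERDICT (by name: the statement is the Claim_ definition above) =====
theorem get_next_ts_spec : Claim_equal_get_next_ts := by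
  intro ts points _hdom hpre
  obtain ⟨hnodup, p0, hp0, hp0ts⟩ := hpre
  unfold Spec_get_next_ts
  set d := PySem.Dict.mk points with hd
  set keys := PySem.List.sorted (points.map Prod.fst) (fun k => k) false with hkeys
  have hperm : keys.Perm (points.map Prod.fst) := PySem.List.sorted_perm _ _ _
  have hpw : keys.Pairwise (· ≤ ·) := by
    have := PySem.List.sorted_pairwise (points.map Prod.fst) (fun k => k)
    simpa using this
  obtain ⟨hile, hlo, hhi⟩ := PySem.List.bisectRight_spec keys ts hpw
  set i := PySem.List.bisectRight keys ts with hi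
  -- i < keys.length since some key exceeds ts
  have hmem0 : p0.1 ∈ keys := hperm.mem_iff.mpr (List.mem_map_of_mem hp0)
  obtain ⟨j0, hj0, hj0e⟩ := List.mem_iff_getElem.mp hmem0
  have hilt : i < keys.length := by
    by_contra h
    have h2 := hlo j0 hj0 (by omega)
    rw [hj0e] at h2
    omega
  -- characterize B's result
  have hBkey : ts < keys[i] := hhi i hilt le_rfl
  have hBmin : ∀ k ∈ keys, ts < k → keys[i] ≤ k := by
    intro k hk hkts
    obtain ⟨j, hj, hje⟩ := List.mem_iff_getElem.mp hk
    rcases lt_or_ge j i with h | h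
    · exfalso; have := hlo j hj h; omega
    · rcases eq_or_lt_of_le h with h | h
      · subst h; omega
      · have := List.pairwise_iff_getElem.mp hpw i j hilt hj h
        omega
  have hB : get_next_ts_alt ts points = (keys[i], d.getD keys[i] 0) := by
    simp only [get_next_ts_alt]
    rw [← hkeys, ← hi, if_neg (Nat.ne_of_lt hilt), ← hd, List.getD_eq_getElem _ _ hilt]
  -- characterize A's result
  obtain ⟨hsome, hnone⟩ := foldA_spec ts d points (none, none) (by simp)
  rcases hr : (points.foldl (stepA ts d) (none, none)).1 with _ | m
  · exact absurd ((hnone hr).2 p0 hp0) (by simpa using hp0ts)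
  obtain ⟨hm_ts, hm_val, hm_mem, hm_min, _⟩ := hsome m hr
  rcases hm_mem with h | ⟨q, hq, hqm⟩
  · simp at h
  -- m is a key of points, hence d.get? m = some (its value)
  have hmkeys : m ∈ d.keys := by
    rw [hd]
    simpa [PySem.Dict.keys_mk] using (hqm ▸ List.mem_map_of_mem hq : m ∈ points.map Prod.fst)
  obtain ⟨bv, hbv⟩ : ∃ bv, d.get? m = some bv := by
    rcases hg : d.get? m with _ | bv
    · exact absurd ((PySem.Dict.get?_eq_none_iff_not_mem_keys d m).mp hg) (by simp [hmkeys])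
    · exact ⟨bv, rfl⟩
  have hA : get_next_ts ts points = (m, bv) := by
    rw [get_next_ts_eq, ← hd]
    rcases hfold : points.foldl (stepA ts d) (none, none) with ⟨b1, b2⟩
    rw [hfold] at hr hm_val
    simp only at hr hm_val
    rw [hr, hm_val, hbv]
  -- the two keys coincide
  have hkm : keys[i] = m := by
    have h1 : m ≤ keys[i] := by
      have hkmem : keys[i] ∈ points.map Prod.fst := hperm.mem_iff.mp (List.getElem_mem hilt)
      obtain ⟨q2, hq2, hq2e⟩ := List.mem_map.mp hkmem
      have := hm_min q2 hq2 (by rw [hq2e]; exact hBkey)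
      omega
    have h2 : keys[i] ≤ m := hBmin m (hperm.mem_iff.mpr (hqm ▸ List.mem_map_of_mem hq)) hm_ts
    omega
  rw [hA, hB, hkm, PySem.Dict.getD_eq_get?_getD, hbv]
  rfl
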